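-- pv_equiv track=rewrite | github.com/dorberu/mai | nn/views.py | hidden_size_list
-- ===== SOURCE A (Python) =====
-- import itertools
--
-- def hidden_size_list(layer_num, max_node):
--     node_list = []
--     seq = range(1, max_node + 1)
--     for i in seq:
--         node_list.append([i])
--
--     if layer_num <= 1:
--         return node_list
--     for i in range(2, layer_num + 1):
--         for tpl in itertools.combinations_with_replacement(seq, i):
--             node_list.append(list(tpl))
--
--     return node_list
-- ===== SOURCE B (Python) =====
-- def hidden_size_list(layer_num, max_node):
--     level = [[v] for v in range(1, max_node + 1)]
--     result = list(level)
--     for _ in range(max(layer_num, 1) - 1):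
--         level = [c + [v] for c in level for v in range(c[-1], max_node + 1)]
--         result += level
--     return result
-- ===== Notes on version B (the rewrite author's own statement) =====
-- stated objective: alternative
-- what changed: Replaces the per-length itertools.combinations_with_replacement calls by an incremental level-by-level construction that extends each combination of the previous length at its tail, reusing previous work instead of regenerating every combination from scratch.
import Mathlib
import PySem

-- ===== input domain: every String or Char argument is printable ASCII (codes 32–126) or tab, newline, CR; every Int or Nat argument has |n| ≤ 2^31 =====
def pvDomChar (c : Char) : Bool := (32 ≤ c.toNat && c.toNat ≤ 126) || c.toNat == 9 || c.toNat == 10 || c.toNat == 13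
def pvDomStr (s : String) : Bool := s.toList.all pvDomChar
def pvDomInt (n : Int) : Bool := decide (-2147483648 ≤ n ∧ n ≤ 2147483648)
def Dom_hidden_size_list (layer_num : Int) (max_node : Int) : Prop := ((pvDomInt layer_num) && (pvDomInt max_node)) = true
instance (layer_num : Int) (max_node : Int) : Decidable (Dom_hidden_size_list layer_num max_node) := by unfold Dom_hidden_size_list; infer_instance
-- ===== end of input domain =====

-- B replaces the per-length itertools.combinations_with_replacement calls by an
-- incremental level-by-level tail extension of the previous level (alternative
-- decomposition; same output, same order).


-- ===== PORT A =====
-- itertools.combinations_with_replacement(pool, r): tuples in the lexicographic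
-- order of index tuples — exactly this standard recursion (exact for any pool).
def cwr : List Int → Nat → List (List Int)
  | _, 0 => [[]]
  | [], _ + 1 => []
  | x :: xs, k + 1 => ((cwr (x :: xs) k).map (fun c => x :: c)) ++ cwr xs (k + 1)
termination_by xs k => (k, xs.length)

def hidden_size_list (layer_num : Int) (max_node : Int) : List (List Int) :=
  let seq := PySem.List.pyRange 1 (max_node + 1) 1
  let node_list := seq.foldl (fun acc i => acc ++ [[i]]) ([] : List (List Int))
  if layer_num ≤ 1 then node_list
  else
    (PySem.List.pyRange 2 (layer_num + 1) 1).foldl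
      (fun acc i => (cwr seq i.toNat).foldl (fun a tpl => a ++ [tpl]) acc) node_list

-- ===== PORT B =====
-- [c + [v] for v in range(c[-1], max_node + 1)]; c is never empty when B runs
-- this (every combination holds ≥ 1 element), so the .getD 0 default is unreachable.
def bExtend (max_node : Int) (c : List Int) : List (List Int) :=
  (PySem.List.pyRange ((PySem.List.pyGet? c (-1)).getD 0) (max_node + 1) 1).map (fun v => c ++ [v])

-- level = [c + [v] for c in level for v in range(c[-1], max_node + 1)]
def bStep (max_node : Int) (level : List (List Int)) : List (List Int) :=
  level.flatMap (bExtend max_node)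

-- 'for _ in range(n): level = bStep(level); result += level'
def bLoop (max_node : Int) : Nat → List (List Int) → List (List Int) → List (List Int)
  | 0, _, result => result
  | n + 1, level, result =>
      let nl := bStep max_node level
      bLoop max_node n nl (result ++ nl)

def hidden_size_list_alt (layer_num : Int) (max_node : Int) : List (List Int) :=
  let level := (PySem.List.pyRange 1 (max_node + 1) 1).map (fun v => [v])
  bLoop max_node (max layer_num 1 - 1).toNat level level

-- ===== PRECONDITION & SPEC =====
def Spec_hidden_size_list (layer_num : Int) (max_node : Int) (out : List (List Int)) : Prop := out = hidden_size_list_alt layer_num max_node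
instance (layer_num : Int) (max_node : Int) (out : List (List Int)) : Decidable (Spec_hidden_size_list layer_num max_node out) := by unfold Spec_hidden_size_list; infer_instance

-- ===== CLAIM (what is proved, stated in full; the proofs are below) =====
def Claim_equal_hidden_size_list : Prop := ∀ (layer_num : Int) (max_node : Int), Dom_hidden_size_list layer_num max_node → Spec_hidden_size_list layer_num max_node (hidden_size_list layer_num max_node)

-- ===== LEMMAS AND PROOFS =====

/-- Every member of `cwr xs k` has length `k`. -/
lemma cwr_length : ∀ (k : Nat) (xs c : List Int), c ∈ cwr xs k → c.length = k := by
  intro k xs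
  induction xs, k using cwr.induct with
  | case1 xs => intro c hc; simp [cwr] at hc; simp [hc]
  | case2 k => intro c hc; simp [cwr] at hc
  | case3 x xs k ih1 ih2 =>
      intro c hc
      simp only [cwr, List.mem_append, List.mem_map] at hc
      rcases hc with ⟨c', hc', rfl⟩ | hc
      · simp [ih1 c' hc']
      · exact ih2 c hc

lemma cwr_one (xs : List Int) : cwr xs 1 = xs.map (fun v => [v]) := by
  induction xs with
  | nil => simp [cwr]
  | cons x xs ih => simp [cwr, ih]

lemma bExtend_cons (M x : Int) (c : List Int) (hc : c ≠ []) :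
    bExtend M (x :: c) = (bExtend M c).map (fun d => x :: d) := by
  cases c with
  | nil => exact absurd rfl hc
  | cons y t =>
      unfold bExtend
      rw [PySem.List.pyGet?_neg_one, PySem.List.pyGet?_neg_one, List.getLast?_cons_cons]
      simp [List.map_map, Function.comp]

lemma cwr_cons (x : Int) (xs : List Int) (k : Nat) :
    cwr (x :: xs) (k + 1) = ((cwr (x :: xs) k).map (fun c => x :: c)) ++ cwr xs (k + 1) := by
  rw [cwr]

/-- Tail extension of a level: extending every combination of `range(lo, M+1)`
of length `k+1` at its tail yields exactly the next level, in the same order. -/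
lemma cwr_ext (M : Int) : ∀ (N k : Nat) (lo : Int), k + (M + 1 - lo).toNat ≤ N →
    (cwr (PySem.List.pyRange lo (M + 1) 1) (k + 1)).flatMap (bExtend M)
      = cwr (PySem.List.pyRange lo (M + 1) 1) (k + 2) := by
  intro N
  induction N with
  | zero =>
      intro k lo h
      have hk : k = 0 := by omega
      subst hk
      rw [PySem.List.pyRange_one_eq_nil (by omega)]
      simp [cwr]
  | succ N ih =>
      intro k lo h
      by_cases hlo : M < lo
      · rw [PySem.List.pyRange_one_eq_nil (by omega)]
        simp [cwr]
      · rw [PySem.List.pyRange_one_cons (by omega)]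
        rw [cwr_cons, cwr_cons]
        rw [List.flatMap_append]
        have hR : lo :: PySem.List.pyRange (lo+1) (M+1) 1 = PySem.List.pyRange lo (M+1) 1 :=
          (PySem.List.pyRange_one_cons (by omega)).symm
        have h2 : (cwr (PySem.List.pyRange (lo+1) (M+1) 1) (k+1)).flatMap (bExtend M)
            = cwr (PySem.List.pyRange (lo+1) (M+1) 1) (k+2) := ih k (lo+1) (by omega)
        rw [h2, hR]
        congr 1
        cases k with
        | zero =>
            simp only [cwr, List.map_cons, List.map_nil, List.flatMap_cons, List.flatMap_nil,
              List.append_nil]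
            unfold bExtend
            rw [PySem.List.pyGet?_neg_one]
            simp [cwr_one, List.map_map, Function.comp]
        | succ j =>
            rw [List.flatMap_map]
            have hcongr : ∀ c ∈ cwr (PySem.List.pyRange lo (M+1) 1) (j+1),
                bExtend M (lo :: c) = (bExtend M c).map (fun d => lo :: d) := by
              intro c hc
              have := cwr_length (j+1) _ c hc
              exact bExtend_cons M lo c (by intro hnil; simp [hnil] at this)
            calc (cwr (PySem.List.pyRange lo (M+1) 1) (j+1)).flatMap (fun c => bExtend M (lo :: c))
                = (cwr (PySem.List.pyRange lo (M+1) 1) (j+1)).flatMap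
                    (fun c => (bExtend M c).map (fun d => lo :: d)) := by
                  exact List.flatMap_congr (fun c hc => hcongr c hc)
              _ = ((cwr (PySem.List.pyRange lo (M+1) 1) (j+1)).flatMap (bExtend M)).map
                    (fun d => lo :: d) := by
                  rw [List.map_flatMap]
              _ = (cwr (PySem.List.pyRange lo (M+1) 1) (j+2)).map (fun d => lo :: d) := by
                  rw [ih j lo (by omega)]

lemma bStep_cwr (M : Int) (k : Nat) :
    bStep M (cwr (PySem.List.pyRange 1 (M + 1) 1) (k + 1))
      = cwr (PySem.List.pyRange 1 (M + 1) 1) (k + 2) :=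
  cwr_ext M (k + (M + 1 - 1).toNat) k 1 (le_refl _)

lemma bLoop_eq (M : Int) : ∀ (n k : Nat) (acc : List (List Int)),
    bLoop M n (cwr (PySem.List.pyRange 1 (M + 1) 1) (k + 1)) acc
      = acc ++ (List.range n).flatMap (fun j => cwr (PySem.List.pyRange 1 (M + 1) 1) (k + 2 + j)) := by
  intro n
  induction n with
  | zero => intro k acc; simp [bLoop]
  | succ n ih =>
      intro k acc
      show bLoop M n (bStep M _) (acc ++ bStep M _) = _
      rw [bStep_cwr, ih (k + 1)]
      rw [List.range_succ_eq_map, List.flatMap_cons, List.flatMap_map]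
      rw [List.append_assoc]
      congr 2
      apply List.flatMap_congr
      intro j _
      congr 1
      omega

-- ===== VERDICT (by name: the statement is the Claim_ definition above) =====
theorem hidden_size_list_spec : Claim_equal_hidden_size_list := by
  intro L M _
  unfold Spec_hidden_size_list hidden_size_list hidden_size_list_alt
  dsimp only
  have hnode : (PySem.List.pyRange 1 (M + 1) 1).foldl
      (fun acc i => acc ++ [[i]]) ([] : List (List Int))
      = (PySem.List.pyRange 1 (M + 1) 1).map (fun i => [i]) := by
    rw [PySem.List.foldl_append_singleton_eq_map, List.nil_append]
  rw [hnode]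
  by_cases hL : L ≤ 1
  · rw [if_pos hL, show max L 1 = 1 by omega]
    simp [bLoop]
  · rw [if_neg hL]
    have hbody : ∀ (acc : List (List Int)) (i : Int), i ∈ PySem.List.pyRange 2 (L + 1) 1 →
        (cwr (PySem.List.pyRange 1 (M + 1) 1) i.toNat).foldl (fun a tpl => a ++ [tpl]) acc
          = acc ++ cwr (PySem.List.pyRange 1 (M + 1) 1) i.toNat := by
      intro acc i _
      exact PySem.List.foldl_append_singleton_eq_self _ _
    rw [PySem.List.foldl_congr_mem _ _ _ _ hbody, PySem.List.foldl_append_eq_flatMap]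
    rw [show (max L 1 - 1).toNat = (L - 1).toNat by omega]
    rw [show (PySem.List.pyRange 1 (M + 1) 1).map (fun i => ([i] : List Int))
          = cwr (PySem.List.pyRange 1 (M + 1) 1) 1 from (cwr_one _).symm]
    rw [bLoop_eq M ((L - 1).toNat) 0]
    congr 1
    rw [show PySem.List.pyRange 2 (L + 1) 1
          = (List.range (L - 1).toNat).map (fun k : Nat => (2 : Int) + (k : Int)) from by
        rw [PySem.List.pyRange_one, show (L + 1 - 2).toNat = (L - 1).toNat by omega]]
    rw [List.flatMap_map]
    apply List.flatMap_congr
    intro j _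
    congr 1
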